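-- pv_equiv track=rewrite | github.com/sharma-anubhav/CrackingTheCodingInterview-DSA | ch43(PrefixSum)/43.2.py | get_ps
-- ===== SOURCE A (Python) =====
-- def get_ps(arr1, arr2):
--     ps = [0]*len(arr1)
--     if arr1[0]>arr2[0]:
--         ps[0] = 1
--     for i in range(1, len(arr1)):
--         if arr1[i]>arr2[i]:
--             ps[i] = ps[i-1]+1
--         else:
--             ps[i] = ps[i-1]
--     return ps
-- ===== SOURCE B (Python) =====
-- def get_ps(arr1, arr2):
--     flags = [1 if arr1[i] > arr2[i] else 0 for i in range(len(arr1))]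
--     return [sum(flags[:i + 1]) for i in range(len(flags))]
-- ===== Notes on version B (the rewrite author's own statement) =====
-- stated objective: simpler
-- what changed: B first builds the list of 0/1 comparison flags, then computes each prefix count independently as the sum of a slice of that list, replacing A's preallocated array and running accumulator reading ps[i-1].
import Mathlib
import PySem

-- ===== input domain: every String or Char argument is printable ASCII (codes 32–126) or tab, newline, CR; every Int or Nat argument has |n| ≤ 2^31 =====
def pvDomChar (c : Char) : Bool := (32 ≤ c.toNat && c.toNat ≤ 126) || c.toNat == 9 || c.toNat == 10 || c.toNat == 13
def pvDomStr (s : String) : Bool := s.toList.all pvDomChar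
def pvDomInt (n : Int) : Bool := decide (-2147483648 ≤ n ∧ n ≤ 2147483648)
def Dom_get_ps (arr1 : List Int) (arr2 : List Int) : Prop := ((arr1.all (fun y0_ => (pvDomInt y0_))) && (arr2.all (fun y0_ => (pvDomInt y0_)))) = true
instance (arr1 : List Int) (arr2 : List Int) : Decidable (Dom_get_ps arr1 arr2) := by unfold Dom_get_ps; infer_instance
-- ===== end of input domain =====

-- B builds the 0/1 comparison-flag list once and returns each prefix count as the sum of a
-- slice of it ("simpler": no preallocated array, no running accumulator; O(n^2) vs A's O(n)).

-- ===== PORT A =====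
def get_ps (arr1 : List Int) (arr2 : List Int) : List Int :=
  let ps := List.replicate arr1.length (0 : Int)
  let ps := if PySem.List.pyGetD arr2 0 0 < PySem.List.pyGetD arr1 0 0 then ps.set 0 1 else ps
  (PySem.List.pyRange 1 (arr1.length : Int) 1).foldl
    (fun ps i =>
      if PySem.List.pyGetD arr2 i 0 < PySem.List.pyGetD arr1 i 0 then
        ps.set i.toNat (PySem.List.pyGetD ps (i - 1) 0 + 1)
      else
        ps.set i.toNat (PySem.List.pyGetD ps (i - 1) 0)) ps

-- ===== PORT B =====
def get_ps_alt (arr1 : List Int) (arr2 : List Int) : List Int :=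
  let flags := (List.range arr1.length).map
    (fun (i : Nat) => if PySem.List.pyGetD arr2 (i : Int) 0 < PySem.List.pyGetD arr1 (i : Int) 0 then (1 : Int) else 0)
  -- flags[:i+1] with a nonnegative bound is List.take (i+1)
  (List.range flags.length).map (fun i => (flags.take (i + 1)).sum)

-- ===== PRECONDITION & SPEC =====
-- Pre_ excludes exactly the inputs on which A raises IndexError: empty arr1 (arr1[0])
-- or arr2 shorter than arr1 (arr2[i] for i ≥ len(arr2)).
def Pre_get_ps (arr1 : List Int) (arr2 : List Int) : Prop :=
  arr1 ≠ [] ∧ arr1.length ≤ arr2.length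
instance (arr1 : List Int) (arr2 : List Int) : Decidable (Pre_get_ps arr1 arr2) := by
  unfold Pre_get_ps; infer_instance
def pvWitness_get_ps : List Int × List Int := ([1, 0, 2], [0, 3, 1])

def Spec_get_ps (arr1 : List Int) (arr2 : List Int) (out : List Int) : Prop := out = get_ps_alt arr1 arr2
instance (arr1 : List Int) (arr2 : List Int) (out : List Int) : Decidable (Spec_get_ps arr1 arr2 out) := by unfold Spec_get_ps; infer_instance

-- ===== CLAIM (what is proved, stated in full; the proofs are below) =====
def Claim_equal_get_ps : Prop := ∀ (arr1 : List Int) (arr2 : List Int), Dom_get_ps arr1 arr2 → Pre_get_ps arr1 arr2 → Spec_get_ps arr1 arr2 (get_ps arr1 arr2)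

-- ===== LEMMAS AND PROOFS =====

/-- 1 if arr1>arr2 at this pair, else 0. -/
def pvFv (p : Int × Int) : Int := if p.2 < p.1 then 1 else 0

/-- Number of pairs with arr1>arr2. -/
def pvTot (l : List (Int × Int)) : Int := (l.countP (fun p => p.2 < p.1) : Int)

/-- Forward prefix counts starting from c: the common value both programs compute. -/
def pcAux : List (Int × Int) → Int → List Int
  | [], _ => []
  | p :: rest, c => (c + pvFv p) :: pcAux rest (c + pvFv p)

theorem pvTot_nil : pvTot [] = 0 := rfl

theorem pvTot_cons (p : Int × Int) (l : List (Int × Int)) :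
    pvTot (p :: l) = pvFv p + pvTot l := by
  unfold pvTot pvFv
  rw [List.countP_cons]
  simp only [decide_eq_true_eq]
  split_ifs <;> push_cast <;> ring

theorem pcAux_append (l1 l2 : List (Int × Int)) (c : Int) :
    pcAux (l1 ++ l2) c = pcAux l1 c ++ pcAux l2 (c + pvTot l1) := by
  induction l1 generalizing c with
  | nil => simp [pcAux, pvTot]
  | cons p rest ih =>
      simp only [List.cons_append, pcAux, ih, pvTot_cons, add_assoc]

theorem pcAux_length (l : List (Int × Int)) (c : Int) :
    (pcAux l c).length = l.length := by
  induction l generalizing c with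
  | nil => rfl
  | cons p rest ih => simp [pcAux, ih]

theorem pcAux_last (l : List (Int × Int)) (c : Int) (h : l ≠ []) :
    (pcAux l c).getD (l.length - 1) 0 = c + pvTot l := by
  induction l generalizing c with
  | nil => exact absurd rfl h
  | cons p rest ih =>
      cases rest with
      | nil => simp [pcAux, pvTot_cons, pvTot_nil]
      | cons q t =>
          have hlen : (p :: q :: t).length - 1 = (q :: t).length - 1 + 1 := by
            simp
          rw [hlen]
          show (pcAux (q :: t) (c + pvFv p)).getD ((q :: t).length - 1) 0 = _
          rw [ih (c + pvFv p) (by simp)]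
          simp [pvTot_cons]
          ring

theorem pvTot_eq_sum_map (l : List (Int × Int)) : (l.map pvFv).sum = pvTot l := by
  induction l with
  | nil => simp [pvTot]
  | cons p rest ih => rw [List.map_cons, List.sum_cons, ih, pvTot_cons]

theorem pcAux_eq_map (l : List (Int × Int)) (c : Int) :
    pcAux l c = (List.range l.length).map (fun i => c + pvTot (l.take (i + 1))) := by
  induction l generalizing c with
  | nil => simp [pcAux]
  | cons p rest ih =>
      simp only [pcAux, List.length_cons, List.range_succ_eq_map, List.map_cons, List.map_map]
      congr 1
      · simp [pvTot_cons, pvTot_nil]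
      · rw [ih (c + pvFv p)]
        apply List.map_congr_left
        intro i _
        simp only [Function.comp_apply, List.take_succ_cons, pvTot_cons]
        ring

theorem flags_eq (arr1 arr2 : List Int) (h2 : arr1.length ≤ arr2.length) :
    (List.range arr1.length).map
      (fun (i : Nat) => if PySem.List.pyGetD arr2 (i : Int) 0 < PySem.List.pyGetD arr1 (i : Int) 0 then (1 : Int) else 0)
    = (arr1.zip arr2).map pvFv := by
  have hpl : (arr1.zip arr2).length = arr1.length := by rw [List.length_zip]; omega
  apply List.ext_getElem
  · simp [hpl]
  · intro i hi hi2
    have hir : i < arr1.length := by simpa using hi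
    have hz : i < (arr1.zip arr2).length := by omega
    simp only [List.getElem_map, List.getElem_range]
    rw [PySem.List.pyGetD_natCast, PySem.List.pyGetD_natCast,
      List.getD_eq_getElem arr1 0 hir, List.getD_eq_getElem arr2 0 (by omega)]
    have hzipk : (arr1.zip arr2)[i]'hz = (arr1[i]'hir, arr2[i]'(by omega)) :=
      List.getElem_zip
    rw [hzipk]
    rfl

theorem get_ps_alt_eq (arr1 arr2 : List Int) (h2 : arr1.length ≤ arr2.length) :
    get_ps_alt arr1 arr2 = pcAux (arr1.zip arr2) 0 := by
  unfold get_ps_alt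
  rw [flags_eq arr1 arr2 h2, pcAux_eq_map]
  simp only [List.length_map, zero_add]
  apply List.map_congr_left
  intro i _
  rw [← List.map_take, pvTot_eq_sum_map]

theorem get_ps_inv (arr1 arr2 : List Int) (hn : 1 ≤ arr1.length)
    (h2 : arr1.length ≤ arr2.length) (k : Nat) (hk : 1 ≤ k) (hkn : k ≤ arr1.length) :
    (PySem.List.pyRange 1 (k : Int) 1).foldl
      (fun ps i =>
        if PySem.List.pyGetD arr2 i 0 < PySem.List.pyGetD arr1 i 0 then
          ps.set i.toNat (PySem.List.pyGetD ps (i - 1) 0 + 1)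
        else
          ps.set i.toNat (PySem.List.pyGetD ps (i - 1) 0))
      (if PySem.List.pyGetD arr2 0 0 < PySem.List.pyGetD arr1 0 0 then
          (List.replicate arr1.length (0 : Int)).set 0 1
        else List.replicate arr1.length (0 : Int))
    = pcAux ((arr1.zip arr2).take k) 0 ++ List.replicate (arr1.length - k) 0 := by
  induction k, hk using Nat.le_induction with
  | base =>
      rw [PySem.List.pyRange_one_eq_nil (by norm_num)]
      simp only [List.foldl_nil]
      obtain ⟨a1, t1, rfl⟩ : ∃ a t, arr1 = a :: t := by
        cases arr1 with
        | nil => simp at hn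
        | cons a t => exact ⟨a, t, rfl⟩
      obtain ⟨a2, t2, rfl⟩ : ∃ a t, arr2 = a :: t := by
        cases arr2 with
        | nil => simp at h2
        | cons a t => exact ⟨a, t, rfl⟩
      simp only [PySem.List.pyGetD_zero_cons, List.zip_cons_cons, List.take_succ_cons,
        List.take_zero, pcAux, pvFv, List.length_cons, List.replicate_succ,
        Nat.add_sub_cancel, List.set_cons_zero]
      split_ifs <;> simp
  | succ k hk1 ih =>
      have hkn' : k < arr1.length := by omega
      have hpl : (arr1.zip arr2).length = arr1.length := by
        rw [List.length_zip]; omega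
      have htakelen : ((arr1.zip arr2).take k).length = k := by
        rw [List.length_take]; omega
      have hcast : ((k + 1 : Nat) : Int) = (k : Int) + 1 := by push_cast; ring
      rw [hcast, PySem.List.pyRange_one_succ_right (by exact_mod_cast hk1),
        List.foldl_append, ih (by omega)]
      simp only [List.foldl_cons, List.foldl_nil]
      have hGet1 : PySem.List.pyGetD arr1 (k : Int) 0 = arr1[k]'hkn' := by
        rw [PySem.List.pyGetD_natCast]
        exact List.getD_eq_getElem arr1 0 hkn'
      have hGet2 : PySem.List.pyGetD arr2 (k : Int) 0 = arr2[k]'(by omega) := by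
        rw [PySem.List.pyGetD_natCast]
        exact List.getD_eq_getElem arr2 0 (by omega)
      have hzipk : (arr1.zip arr2)[k]'(by omega) = (arr1[k]'hkn', arr2[k]'(by omega)) :=
        List.getElem_zip
      have htne : (arr1.zip arr2).take k ≠ [] := by
        intro h
        rw [h] at htakelen
        simp at htakelen
        omega
      have hPget : PySem.List.pyGetD
          (pcAux ((arr1.zip arr2).take k) 0 ++ List.replicate (arr1.length - k) 0)
          ((k : Int) - 1) 0 = pvTot ((arr1.zip arr2).take k) := by
        have hidx : ((k : Int) - 1) = ((k - 1 : Nat) : Int) := by omega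
        rw [hidx, PySem.List.pyGetD_natCast,
          List.getD_append _ _ _ _ (by rw [pcAux_length, htakelen]; omega)]
        have := pcAux_last ((arr1.zip arr2).take k) 0 htne
        rw [htakelen] at this
        rw [this]
        ring
      have hsetP : ∀ v : Int,
          (pcAux ((arr1.zip arr2).take k) 0 ++ List.replicate (arr1.length - k) 0).set k v
            = pcAux ((arr1.zip arr2).take k) 0 ++ (v :: List.replicate (arr1.length - (k + 1)) 0) := by
        intro v
        have hrep : List.replicate (arr1.length - k) (0 : Int)
            = 0 :: List.replicate (arr1.length - (k + 1)) 0 := by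
          have h' : arr1.length - k = (arr1.length - (k + 1)) + 1 := by omega
          rw [h', List.replicate_succ]
        rw [hrep, List.set_append]
        simp [pcAux_length, htakelen]
      have htake1 : (arr1.zip arr2).take (k + 1)
          = (arr1.zip arr2).take k ++ [(arr1[k]'hkn', arr2[k]'(by omega))] := by
        rw [List.take_add_one, List.getElem?_eq_getElem (by omega), hzipk]
        rfl
      have hrhs : pcAux ((arr1.zip arr2).take (k + 1)) 0
          = pcAux ((arr1.zip arr2).take k) 0
            ++ [pvTot ((arr1.zip arr2).take k) + pvFv (arr1[k]'hkn', arr2[k]'(by omega))] := by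
        rw [htake1, pcAux_append]
        simp [pcAux]
      rw [hGet1, hGet2, hPget, Int.toNat_natCast, hrhs]
      split_ifs with h
      · rw [hsetP]
        simp only [pvFv, h, if_pos]
        simp
      · rw [hsetP]
        simp only [pvFv, h, if_neg, not_false_iff]
        simp

theorem get_ps_eq (arr1 arr2 : List Int) (h1 : arr1 ≠ [])
    (h2 : arr1.length ≤ arr2.length) :
    get_ps arr1 arr2 = pcAux (arr1.zip arr2) 0 := by
  have hn : 1 ≤ arr1.length := List.length_pos_of_ne_nil h1
  have hstart : get_ps arr1 arr2
      = (PySem.List.pyRange 1 (arr1.length : Int) 1).foldl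
        (fun ps i =>
          if PySem.List.pyGetD arr2 i 0 < PySem.List.pyGetD arr1 i 0 then
            ps.set i.toNat (PySem.List.pyGetD ps (i - 1) 0 + 1)
          else
            ps.set i.toNat (PySem.List.pyGetD ps (i - 1) 0))
        (if PySem.List.pyGetD arr2 0 0 < PySem.List.pyGetD arr1 0 0 then
            (List.replicate arr1.length (0 : Int)).set 0 1
          else List.replicate arr1.length (0 : Int)) := rfl
  rw [hstart, get_ps_inv arr1 arr2 hn h2 arr1.length hn le_rfl]
  have hpl : (arr1.zip arr2).length = arr1.length := by rw [List.length_zip]; omega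
  rw [List.take_of_length_le (by omega)]
  simp

-- ===== VERDICT (by name: the statement is the Claim_ definition above) =====
theorem get_ps_spec : Claim_equal_get_ps := by
  intro arr1 arr2 _ hpre
  unfold Spec_get_ps
  rw [get_ps_eq arr1 arr2 hpre.1 hpre.2, get_ps_alt_eq arr1 arr2 hpre.2]
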